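-- pv_equiv track=rewrite | github.com/marcfrederick/php-version-compare | src/php_version_compare/versioning.py | canonicalize_version
-- ===== SOURCE A (Python) =====
-- from typing import List, Union, Optional
--
-- def canonicalize_version(version: str) -> str:
--     """
--     Canonicalize a version string into a "PHP-style" version string. This
--     function is used to normalize version strings before comparing them.
--
--     Examples:
--         >>> canonicalize_version("1.0")
--         '1.0'
--         >>> canonicalize_version("1.0-DEV")
--         '1.0.DEV'
--         >>> canonicalize_version("1.0.1alpha")
--         '1.0.1.alpha'
--     """
--
--     canonicalized: List[str] = []
--     previous_char = None
--
--     for curr_char in version: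
--         if curr_char in "-+_":
--             curr_char = "."
--         elif previous_char and (
--             (previous_char.isdigit() and curr_char.isalpha())
--             or (previous_char.isalpha() and curr_char.isdigit())
--         ):
--             canonicalized.append(".")
--
--         canonicalized.append(curr_char)
--         previous_char = curr_char
--
--     return "".join(canonicalized)
-- ===== SOURCE B (Python) =====
-- def canonicalize_version(version: str) -> str:
--     """Run-based rewrite: classify characters, walk maximal same-class runs,
--     emit dots for separator runs and a transition dot between adjacent
--     digit/alpha runs."""
--
--     def cls(ch: str) -> int:
--         if ch in "-+_":
--             return 0
--         if ch.isdigit():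
--             return 1
--         if ch.isalpha():
--             return 2
--         return 3
--
--     out = []
--     prev = None
--     i, n = 0, len(version)
--     while i < n:
--         k = cls(version[i])
--         j = i + 1
--         while j < n and cls(version[j]) == k:
--             j += 1
--         if k == 0:
--             out.append("." * (j - i))
--         else:
--             if (prev == 1 and k == 2) or (prev == 2 and k == 1):
--                 out.append(".")
--             out.append(version[i:j])
--         prev = k
--         i = j
--     return "".join(out)
-- ===== Notes on version B (the rewrite author's own statement) =====
-- stated objective: alternative
-- what changed: A's char-by-char state machine carrying previous_char is replaced by a run-based sweep: characters are classified (separator/digit/alpha/other), maximal same-class runs are located with an inner scan, separator runs emit one dot per char, other runs are emitted verbatim with a single transition dot between directly adjacent digit and alpha runs.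
import Mathlib
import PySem

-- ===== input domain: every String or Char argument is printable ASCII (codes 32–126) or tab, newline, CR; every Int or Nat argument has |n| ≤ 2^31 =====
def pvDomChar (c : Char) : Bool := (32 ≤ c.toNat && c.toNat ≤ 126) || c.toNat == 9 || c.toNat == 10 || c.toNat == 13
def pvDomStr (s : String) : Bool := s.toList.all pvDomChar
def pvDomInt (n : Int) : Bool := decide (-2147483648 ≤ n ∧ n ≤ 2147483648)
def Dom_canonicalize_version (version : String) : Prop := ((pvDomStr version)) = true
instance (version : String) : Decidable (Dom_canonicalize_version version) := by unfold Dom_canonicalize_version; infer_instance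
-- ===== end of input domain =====

-- B rewrites A's char-by-char state machine as a run-based sweep over maximal
-- same-class runs (objective: alternative decomposition, same O(n) cost).

-- ===== PORT A =====
-- one loop step of A: state = (canonicalized, previous_char)
def cvStep (st : List Char × Option Char) (curr : Char) : List Char × Option Char :=
  if curr == '-' || curr == '+' || curr == '_' then
    -- curr_char = "."
    (st.1 ++ ['.'], some '.')
  else
    let acc :=
      match st.2 with
      | none => st.1
      | some p =>
        if (PySem.Chars.isdigit p && PySem.Chars.isalpha curr) ||
           (PySem.Chars.isalpha p && PySem.Chars.isdigit curr) then st.1 ++ ['.'] else st.1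
    (acc ++ [curr], some curr)

def canonicalize_version (version : String) : String :=
  String.ofList (version.toList.foldl cvStep ([], none)).1

-- ===== PORT B =====
-- character class: 0 = separator, 1 = digit, 2 = alpha, 3 = other
def cvCls (ch : Char) : Nat :=
  if ch == '-' || ch == '+' || ch == '_' then 0
  else if PySem.Chars.isdigit ch then 1
  else if PySem.Chars.isalpha ch then 2
  else 3

-- the run-based while loop of Source B: the inner `while j < n and cls(version[j]) == k`
-- scan is takeWhile/dropWhile on the remaining characters
def cvGo (prev : Option Nat) (l : List Char) : List Char :=
  match l with
  | [] => []
  | c :: rest =>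
    let k := cvCls c
    let run := c :: rest.takeWhile (fun d => cvCls d == k)
    let rest' := rest.dropWhile (fun d => cvCls d == k)
    (if k == 0 then List.replicate run.length '.'
     else (if (prev == some 1 && k == 2) || (prev == some 2 && k == 1)
           then ['.'] else []) ++ run)
      ++ cvGo (some k) rest'
termination_by l.length
decreasing_by
  simp only [List.length_cons]
  exact Nat.lt_succ_of_le (List.length_dropWhile_le _ _)

def canonicalize_version_alt (version : String) : String :=
  String.ofList (cvGo none version.toList)

-- ===== PRECONDITION & SPEC =====
def Spec_canonicalize_version (version : String) (out : String) : Prop := out = canonicalize_version_alt version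
instance (version : String) (out : String) : Decidable (Spec_canonicalize_version version out) := by unfold Spec_canonicalize_version; infer_instance

-- ===== CLAIM (what is proved, stated in full; the proofs are below) =====
def Claim_equal_canonicalize_version : Prop := ∀ (version : String), Dom_canonicalize_version version → Spec_canonicalize_version version (canonicalize_version version)

-- ===== LEMMAS AND PROOFS =====

-- the invariant tying A's previous_char to B's previous run class
def cvInv (q : Char) (km : Nat) : Prop :=
  PySem.Chars.isdigit q = decide (km = 1) ∧ PySem.Chars.isalpha q = decide (km = 2)

def cvRel (p : Option Char) (m : Option Nat) : Prop :=
  match p, m with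
  | none, none => True
  | some q, some km => cvInv q km
  | _, _ => False

lemma digit_not_alpha (c : Char) (h : PySem.Chars.isdigit c = true) :
    PySem.Chars.isalpha c = false := by
  simp [PySem.Chars.isdigit, Char.le_def, UInt32.le_iff_toNat_le] at h
  simp [PySem.Chars.isalpha, PySem.Chars.isupper, PySem.Chars.islower, Char.le_def,
    UInt32.le_iff_toNat_le]
  omega

lemma cls_zero_iff (c : Char) : cvCls c = 0 ↔ (c == '-' || c == '+' || c == '_') = true := by
  unfold cvCls; split_ifs with h1 h2 h3 <;> simp [h1]

lemma inv_of_cls (q : Char) (hq : cvCls q ≠ 0) : cvInv q (cvCls q) := by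
  unfold cvCls at *
  split_ifs at * with h1 h2 h3 <;> constructor <;>
    simp_all [digit_not_alpha]

-- A's fold over a run of separators: each char becomes '.', previous becomes '.'
lemma foldl_sep (rs : List Char) (acc : List Char)
    (h : ∀ d ∈ rs, cvCls d = 0) :
    rs.foldl cvStep (acc ++ ['.'], some '.') =
      (acc ++ List.replicate (rs.length + 1) '.', some '.') := by
  induction rs generalizing acc with
  | nil => simp
  | cons d rs ih =>
    have hd : (d == '-' || d == '+' || d == '_') = true :=
      (cls_zero_iff d).mp (h d (by simp))
    have := ih (acc ++ ['.']) (fun e he => h e (by simp [he]))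
    simp only [List.foldl_cons, cvStep, hd, if_pos]
    rw [this]
    simp [List.replicate_succ, List.append_assoc]

-- within a non-separator run A never inserts a transition dot
lemma foldl_run (rs : List Char) (k : Nat) (hk : k ≠ 0)
    (h : ∀ d ∈ rs, cvCls d = k) (acc : List Char) (q : Char) (hq : cvCls q = k) :
    rs.foldl cvStep (acc, some q) = (acc ++ rs, some (rs.getLastD q)) := by
  induction rs generalizing acc q with
  | nil => simp
  | cons d rs ih =>
    have hd : cvCls d = k := h d (by simp)
    have hsep : ¬ (d == '-' || d == '+' || d == '_') = true := by
      intro hh; exact hk (hd ▸ (cls_zero_iff d).mpr hh)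
    have hq' : cvInv q k := hq ▸ inv_of_cls q (hq ▸ hk)
    have hd' : cvInv d k := hd ▸ inv_of_cls d (hd ▸ hk)
    have hfire : ((PySem.Chars.isdigit q && PySem.Chars.isalpha d) ||
        (PySem.Chars.isalpha q && PySem.Chars.isdigit d)) = false := by
      rw [hq'.1, hq'.2, hd'.1, hd'.2]
      rcases Nat.decEq k 1 with h1 | h1 <;> rcases Nat.decEq k 2 with h2 | h2 <;> simp_all
    have := ih (fun e he => h e (by simp [he])) (acc ++ [d]) d hd
    simp only [List.foldl_cons, cvStep, hsep, hfire]
    simp only [Bool.false_eq_true, if_false]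
    rw [this]
    cases rs <;> simp [List.getLastD]

-- A's fire test equals B's class test, under the invariant
lemma fire_eq (q : Char) (km : Nat) (hq : cvInv q km) (c : Char) (hc : cvCls c ≠ 0) :
    ((PySem.Chars.isdigit q && PySem.Chars.isalpha c) ||
     (PySem.Chars.isalpha q && PySem.Chars.isdigit c)) =
    ((some km == some 1 && cvCls c == 2) || (some km == some 2 && cvCls c == 1)) := by
  have hcinv : cvInv c (cvCls c) := inv_of_cls c hc
  simp only [hq.1, hq.2, hcinv.1, hcinv.2]
  rcases Nat.decEq km 1 with h1 | h1 <;> rcases Nat.decEq km 2 with h2 | h2 <;>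
    rcases Nat.decEq (cvCls c) 1 with h3 | h3 <;> rcases Nat.decEq (cvCls c) 2 with h4 | h4 <;>
    simp_all

-- A's first step on a non-separator char, phrased with B's transition test
lemma step_eq (p : Option Char) (m : Option Nat) (hrel : cvRel p m)
    (acc : List Char) (c : Char) (hk : cvCls c ≠ 0)
    (hc : ¬ (c == '-' || c == '+' || c == '_') = true) :
    cvStep (acc, p) c =
      (acc ++ (if (m == some 1 && cvCls c == 2) || (m == some 2 && cvCls c == 1)
               then ['.'] else []) ++ [c], some c) := by
  match p, m with
  | none, none => simp [cvStep, hc]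
  | none, some km => exact absurd hrel (by simp [cvRel])
  | some q, none => exact absurd hrel (by simp [cvRel])
  | some q, some km =>
    have hq : cvInv q km := hrel
    simp only [cvStep, hc]
    rw [fire_eq q km hq c hk]
    cases hb : ((some km == some (1 : Nat) && cvCls c == 2) ||
        (some km == some (2 : Nat) && cvCls c == 1)) <;> simp

-- main invariant: A's fold from a related state produces acc ++ B's run output
theorem cvMain (l : List Char) (acc : List Char) (p : Option Char) (m : Option Nat)
    (hrel : cvRel p m) :
    (l.foldl cvStep (acc, p)).1 = acc ++ cvGo m l := by
  match l with
  | [] => simp [cvGo]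
  | c :: rest =>
    have hsplit : rest = rest.takeWhile (fun d => cvCls d == cvCls c) ++
        rest.dropWhile (fun d => cvCls d == cvCls c) :=
      (List.takeWhile_append_dropWhile).symm
    have htake : ∀ d ∈ rest.takeWhile (fun d => cvCls d == cvCls c), cvCls d = cvCls c := by
      intro d hd
      simpa using List.mem_takeWhile_imp hd
    have hlen : (rest.dropWhile (fun d => cvCls d == cvCls c)).length < (c :: rest).length :=
      Nat.lt_succ_of_le (List.length_dropWhile_le _ _)
    by_cases hk : cvCls c = 0
    · -- separator run
      have hc : (c == '-' || c == '+' || c == '_') = true := (cls_zero_iff c).mp hk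
      have ih := cvMain (rest.dropWhile (fun d => cvCls d == cvCls c))
        (acc ++ List.replicate ((rest.takeWhile (fun d => cvCls d == cvCls c)).length + 1) '.')
        (some '.') (some 0) (by constructor <;> decide)
      conv_lhs => rw [hsplit]
      rw [List.foldl_cons, List.foldl_append]
      simp only [cvStep, hc, if_pos]
      rw [foldl_sep _ acc (fun d hd => (htake d hd).trans hk)]
      rw [ih]
      simp only [cvGo]
      simp [hk, List.append_assoc]
    · -- non-separator run
      have hc : ¬ (c == '-' || c == '+' || c == '_') = true := by
        intro hh; exact hk ((cls_zero_iff c).mpr hh)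
      have hlast : cvCls ((rest.takeWhile (fun d => cvCls d == cvCls c)).getLastD c) = cvCls c := by
        have hmem := List.getLastD_mem_cons (l := rest.takeWhile (fun d => cvCls d == cvCls c)) (a := c)
        rcases List.mem_cons.mp hmem with hmem | hmem
        · rw [hmem]
        · exact htake _ hmem
      have ih := cvMain (rest.dropWhile (fun d => cvCls d == cvCls c))
        (acc ++ (if (m == some 1 && cvCls c == 2) || (m == some 2 && cvCls c == 1)
                 then ['.'] else []) ++ (c :: rest.takeWhile (fun d => cvCls d == cvCls c)))
        (some ((rest.takeWhile (fun d => cvCls d == cvCls c)).getLastD c)) (some (cvCls c))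
        (by
          show cvInv _ _
          have := inv_of_cls ((rest.takeWhile (fun d => cvCls d == cvCls c)).getLastD c)
            (by rw [hlast]; exact hk)
          rwa [hlast] at this)
      conv_lhs => rw [hsplit]
      rw [List.foldl_cons, List.foldl_append]
      rw [step_eq p m hrel acc c hk hc]
      rw [foldl_run _ (cvCls c) hk htake _ c rfl]
      rw [show ((acc ++ (if (m == some 1 && cvCls c == 2) || (m == some 2 && cvCls c == 1)
               then ['.'] else []) ++ [c]) ++ rest.takeWhile (fun d => cvCls d == cvCls c))
            = acc ++ (if (m == some 1 && cvCls c == 2) || (m == some 2 && cvCls c == 1)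
               then ['.'] else []) ++ (c :: rest.takeWhile (fun d => cvCls d == cvCls c)) by
        simp [List.append_assoc]]
      rw [ih]
      simp only [cvGo]
      have hk' : (cvCls c == 0) = false := by simpa using hk
      simp [hk', List.append_assoc]
  termination_by l.length
  decreasing_by all_goals exact hlen

-- ===== VERDICT (by name: the statement is the Claim_ definition above) =====
theorem canonicalize_version_spec : Claim_equal_canonicalize_version := by
  intro version _hdom
  unfold Spec_canonicalize_version canonicalize_version canonicalize_version_alt
  rw [cvMain version.toList [] none none (by trivial)]
  simp
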